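-- pv_equiv track=rewrite | github.com/paiml/depyler | examples/hard_realworld_simulation.py | max_displacement
-- ===== SOURCE A (Python) =====
-- def max_displacement(positions: list[int]) -> int:
--     """Find maximum absolute displacement from origin."""
--     max_abs: int = 0
--     idx: int = 0
--     while idx < len(positions):
--         val: int = positions[idx]
--         if val < 0:
--             val = 0 - val
--         if val > max_abs:
--             max_abs = val
--         idx = idx + 1
--     return max_abs
-- ===== SOURCE B (Python) =====
-- def max_displacement(positions: list[int]) -> int:
--     """Find maximum absolute displacement from origin."""
--     if not positions:
--         return 0
--     hi = max(positions)
--     lo = min(positions)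
--     return max(hi, -lo)
-- ===== Notes on version B (the rewrite author's own statement) =====
-- stated objective: faster
-- what changed: Replaces A's index-driven running-max-of-absolute-values loop with two built-in aggregate extremum passes (max and min of the signed values) combined as max(hi, -lo) after an explicit empty-list guard.
import Mathlib
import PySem

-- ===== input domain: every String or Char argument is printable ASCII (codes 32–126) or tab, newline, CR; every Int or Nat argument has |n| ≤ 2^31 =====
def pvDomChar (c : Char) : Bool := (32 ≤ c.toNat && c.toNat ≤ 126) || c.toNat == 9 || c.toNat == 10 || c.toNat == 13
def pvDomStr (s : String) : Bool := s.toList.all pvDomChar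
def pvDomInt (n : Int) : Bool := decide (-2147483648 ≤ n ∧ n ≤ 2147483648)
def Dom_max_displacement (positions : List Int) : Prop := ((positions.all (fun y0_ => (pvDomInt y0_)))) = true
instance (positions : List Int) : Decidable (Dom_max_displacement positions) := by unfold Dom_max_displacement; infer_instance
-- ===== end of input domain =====

-- B: two built-in extremum passes (max and min) combined as max(hi, -lo), instead of A's running max of absolute values.
-- ===== PORT A =====
-- the while loop over idx, as structural recursion carrying the running max_abs
def pvMaxLoop : List Int → Int → Int
  | [], max_abs => max_abs
  | v :: rest, max_abs =>
    let val : Int := if v < 0 then 0 - v else v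
    pvMaxLoop rest (if val > max_abs then val else max_abs)

def max_displacement (positions : List Int) : Int := pvMaxLoop positions 0

-- ===== PORT B =====
def max_displacement_alt (positions : List Int) : Int :=
  match positions with
  | [] => 0
  | _ :: _ =>
    let hi : Int := (PySem.List.max? positions (fun y => y)).getD 0
    let lo : Int := (PySem.List.min? positions (fun y => y)).getD 0
    max hi (-lo)

-- ===== PRECONDITION & SPEC =====
def Spec_max_displacement (positions : List Int) (out : Int) : Prop := out = max_displacement_alt positions
instance (positions : List Int) (out : Int) : Decidable (Spec_max_displacement positions out) := by unfold Spec_max_displacement; infer_instance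

-- ===== CLAIM (what is proved, stated in full; the proofs are below) =====
def Claim_equal_max_displacement : Prop := ∀ (positions : List Int), Dom_max_displacement positions → Spec_max_displacement positions (max_displacement positions)

-- ===== LEMMAS AND PROOFS =====

lemma pvMaxLoop_eq (t : List Int) : ∀ a b : Int,
    pvMaxLoop t (max a (-b)) = max (t.foldl max a) (-(t.foldl min b)) := by
  induction t with
  | nil => intro a b; simp [pvMaxLoop]
  | cons v t ih =>
    intro a b
    have h : (if (if v < 0 then 0 - v else v) > max a (-b)
        then (if v < 0 then 0 - v else v) else max a (-b))
        = max (max a v) (-(min b v)) := by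
      split_ifs <;> omega
    simp only [pvMaxLoop, List.foldl_cons]
    rw [h, ih]

-- ===== VERDICT (by name: the statement is the Claim_ definition above) =====
theorem max_displacement_spec : Claim_equal_max_displacement := by
  intro positions _
  unfold Spec_max_displacement
  cases positions with
  | nil => rfl
  | cons x t =>
    have hseed : (if (if x < 0 then 0 - x else x) > (0 : Int)
        then (if x < 0 then 0 - x else x) else (0 : Int)) = max x (-x) := by
      split_ifs <;> omega
    show pvMaxLoop (x :: t) 0 = _
    simp only [pvMaxLoop, max_displacement_alt,
      PySem.List.max?_id_cons, PySem.List.min?_id_cons, Option.getD_some]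
    rw [hseed, pvMaxLoop_eq]
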